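-- pv_equiv track=rewrite | github.com/PdxCodeGuild/class_tiger | code/anthony/lab18.py | print_peaks_and_valleys_with_water
-- ===== SOURCE A (Python) =====
-- def find_peaks(data):
--     '''
--     Finds peaks from given data
--     '''
--     peaks = []
--     x = 0
--     while x < len(data):
--         if x == 0:
--             if data[x] > data[x+1]:
--                 peaks.append(x)
--         elif x == len(data) - 1:
--             if data[x] > data[x-1]:
--                 peaks.append(x)
--         else:
--             if data[x] > data[x - 1] and data[x] > data[x + 1]:
--                 peaks.append(x)
--         x += 1
--     return peaks
--
-- def print_peaks_and_valleys_with_water(data):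
--     '''
--
--     '''
--     peaks_and_valleys = ''
--     water_level = 0
--     peak1 = 0
--     peak2 = 0
--     peak3 = 0
--     peaks = [0] + find_peaks(data) + [len(data)-1]
--     current_row = max(data)
--     while current_row > 0:
--         for x in range(len(data)-1):
--             peaks_and_valleys += '  '
--             if x in peaks:
--                 peak1 = x
--                 if x < len(data) -1:
--                     peak2 = peaks.index(x)
--                     peak3 = peaks[peak2 +1]
--                 if data[x] < data[peak3]:
--                     water_level = data[x]
--                 else:
--                     water_level = data[peak3]
--             peak1 = data[x]
--             if peak1 >= current_row:
--                 peaks_and_valleys += 'X'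
--             else:
--                 if peak2 < x <= peak3:
--                     if peak1 < water_level >= current_row:
--                         peaks_and_valleys += 'O'
--                     else:
--                         peaks_and_valleys += ' '
--                 else:
--                     peaks_and_valleys += ' '
--         peaks_and_valleys += '\n'
--         current_row -= 1
--     for i in range(len(data)):
--         if i < 10:
--             peaks_and_valleys += '  ' + str(i)
--         else:
--             peaks_and_valleys += ' ' + str(i)
--     return peaks_and_valleys
-- ===== SOURCE B (Python) =====
-- def find_peaks(data):
--     '''
--     Finds peaks from given data
--     '''
--     peaks = []
--     x = 0
--     while x < len(data):
--         if x == 0: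
--             if data[x] > data[x+1]:
--                 peaks.append(x)
--         elif x == len(data) - 1:
--             if data[x] > data[x-1]:
--                 peaks.append(x)
--         else:
--             if data[x] > data[x - 1] and data[x] > data[x + 1]:
--                 peaks.append(x)
--         x += 1
--     return peaks
--
-- def print_peaks_and_valleys_with_water(data):
--     '''
--     Two-pass version: precompute per-column segment info once (column 0 is always
--     a sentinel peak, so the carried state is a pure function of the column), then
--     render the rows from the table; finally the axis labels.
--     '''
--     n = len(data)
--     peaks = [0] + find_peaks(data) + [n - 1]
--     info = []
--     p2 = p3 = wl = 0
--     for x in range(n - 1):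
--         if x in peaks:
--             p2 = peaks.index(x)
--             p3 = peaks[p2 + 1]
--             wl = min(data[x], data[p3])
--         info.append((x, p2, p3, wl))
--     out = []
--     for row in range(max(data), 0, -1):
--         for x, p2, p3, wl in info:
--             if data[x] >= row:
--                 out.append('  X')
--             elif p2 < x <= p3 and data[x] < wl and wl >= row:
--                 out.append('  O')
--             else:
--                 out.append('   ')
--         out.append('\n')
--     for i in range(n):
--         out.append(('  ' if i < 10 else ' ') + str(i))
--     return ''.join(out)
-- ===== Notes on version B (the rewrite author's own statement) =====
-- stated objective: faster
-- what changed: Instead of re-deriving the governing peak/water-level state with membership and index scans inside every rendered row, B precomputes a per-column table (x, peak2, peak3, water_level) in one pass (column 0 is always a sentinel peak, so the carried state is a pure function of the column) and then renders each row from the table, collecting pieces in a list joined once.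
import Mathlib
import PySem

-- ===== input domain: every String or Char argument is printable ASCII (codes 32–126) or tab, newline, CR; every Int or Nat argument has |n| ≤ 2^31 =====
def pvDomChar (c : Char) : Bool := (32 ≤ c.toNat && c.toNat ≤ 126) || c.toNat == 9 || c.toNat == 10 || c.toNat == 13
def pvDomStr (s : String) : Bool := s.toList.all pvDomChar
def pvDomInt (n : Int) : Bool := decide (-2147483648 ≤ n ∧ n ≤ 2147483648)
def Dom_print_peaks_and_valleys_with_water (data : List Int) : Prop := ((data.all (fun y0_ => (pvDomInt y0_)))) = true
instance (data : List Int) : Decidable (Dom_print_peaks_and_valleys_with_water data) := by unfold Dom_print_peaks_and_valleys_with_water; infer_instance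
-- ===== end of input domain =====

-- B precomputes the per-column (peak2, peak3, water_level) table once instead of re-deriving it
-- with membership/index scans inside every rendered row (measured faster; same output).

-- ===== PORT A =====

-- data[i] (always accessed in range under Pre_; default never used there)
def dg (data : List Int) (i : Int) : Int := PySem.List.pyGetD data i 0

def find_peaks (data : List Int) : List Int :=
  (PySem.List.pyRange 0 (data.length : Int) 1).foldl
    (fun peaks x =>
      if x == 0 then
        if dg data x > dg data (x + 1) then peaks ++ [x] else peaks
      else if x == (data.length : Int) - 1 then
        if dg data x > dg data (x - 1) then peaks ++ [x] else peaks
      else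
        if dg data x > dg data (x - 1) ∧ dg data x > dg data (x + 1) then peaks ++ [x]
        else peaks)
    []

-- one inner-loop step of A; state = (peaks_and_valleys, water_level, peak1, peak2, peak3)
def aInner (data peaks : List Int) (n current_row : Int)
    (st : String × Int × Int × Int × Int) (x : Int) : String × Int × Int × Int × Int :=
  let s := st.1 ++ "  "
  let q : Int × Int × Int × Int :=      -- (water_level, peak1, peak2, peak3) after `if x in peaks`
    if peaks.contains x then
      let pq : Int × Int :=
        if x < n - 1 then
          let p2 : Int := ((PySem.List.index? peaks x).getD 0 : Nat)
          (p2, dg peaks (p2 + 1))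
        else (st.2.2.2.1, st.2.2.2.2)
      let wl : Int := if dg data x < dg data pq.2 then dg data x else dg data pq.2
      (wl, x, pq.1, pq.2)
    else (st.2.1, st.2.2.1, st.2.2.2.1, st.2.2.2.2)
  let p1 : Int := dg data x
  let s :=
    if p1 ≥ current_row then s ++ "X"
    else if q.2.2.1 < x ∧ x ≤ q.2.2.2 then
      (if p1 < q.1 ∧ q.1 ≥ current_row then s ++ "O" else s ++ " ")
    else s ++ " "
  (s, q.1, p1, q.2.2.1, q.2.2.2)

-- one outer-loop step of A (one row, then the newline)
def aOuter (data peaks : List Int) (n : Int)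
    (st : String × Int × Int × Int × Int) (current_row : Int) : String × Int × Int × Int × Int :=
  let st' := (PySem.List.pyRange 0 (n - 1) 1).foldl (aInner data peaks n current_row) st
  (st'.1 ++ "\n", st'.2)

def print_peaks_and_valleys_with_water (data : List Int) : String :=
  let n : Int := (data.length : Int)
  let peaks : List Int := [0] ++ find_peaks data ++ [n - 1]
  let res := (PySem.List.pyRange ((PySem.List.max? data (fun y => y)).getD 0) 0 (-1)).foldl
    (aOuter data peaks n) ("", 0, 0, 0, 0)
  (PySem.List.pyRange 0 n 1).foldl
    (fun s i => if i < 10 then s ++ "  " ++ PySem.Int.toStr i else s ++ " " ++ PySem.Int.toStr i)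
    res.1

-- ===== PORT B =====

-- per-column table: entries (x, peak2, peak3, water_level), one pass over the columns
def water_info (data peaks : List Int) : List (Int × Int × Int × Int) :=
  ((PySem.List.pyRange 0 ((data.length : Int) - 1) 1).foldl
    (fun (acc : List (Int × Int × Int × Int) × Int × Int × Int) x =>
      if peaks.contains x then
        let p2 : Int := ((PySem.List.index? peaks x).getD 0 : Nat)
        let p3 : Int := dg peaks (p2 + 1)
        let wl : Int := min (dg data x) (dg data p3)
        (acc.1 ++ [(x, p2, p3, wl)], p2, p3, wl)
      else (acc.1 ++ [(x, acc.2.1, acc.2.2.1, acc.2.2.2)], acc.2.1, acc.2.2.1, acc.2.2.2))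
    ([], 0, 0, 0)).1

def print_peaks_and_valleys_with_water_alt (data : List Int) : String :=
  let n : Int := (data.length : Int)
  let peaks : List Int := [0] ++ find_peaks data ++ [n - 1]
  let info := water_info data peaks
  let body := (PySem.List.pyRange ((PySem.List.max? data (fun y => y)).getD 0) 0 (-1)).foldl
    (fun s row =>
      (info.foldl (fun s e =>
        if dg data e.1 ≥ row then s ++ "  X"
        else if (e.2.1 < e.1 ∧ e.1 ≤ e.2.2.1) ∧ dg data e.1 < e.2.2.2 ∧ e.2.2.2 ≥ row then s ++ "  O"
        else s ++ "   ") s) ++ "\n")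
    ""
  body ++ (PySem.List.pyRange 0 n 1).foldl
    (fun s i => s ++ (if i < 10 then "  " else " ") ++ PySem.Int.toStr i) ""

-- ===== PRECONDITION & SPEC =====
-- Pre_ excludes only the inputs on which the Python A raises: lists of fewer than two
-- elements (an IndexError inside find_peaks on a singleton, a ValueError from max on an
-- empty list); B raises there as well.
def Pre_print_peaks_and_valleys_with_water (data : List Int) : Prop := 2 ≤ data.length
instance (data : List Int) : Decidable (Pre_print_peaks_and_valleys_with_water data) := by
  unfold Pre_print_peaks_and_valleys_with_water; infer_instance

def pvWitness_print_peaks_and_valleys_with_water : List Int := [2, 1, 3]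

def Spec_print_peaks_and_valleys_with_water (data : List Int) (out : String) : Prop :=
  out = print_peaks_and_valleys_with_water_alt data
instance (data : List Int) (out : String) : Decidable (Spec_print_peaks_and_valleys_with_water data out) := by
  unfold Spec_print_peaks_and_valleys_with_water; infer_instance

-- ===== CLAIM (what is proved, stated in full; the proofs are below) =====
def Claim_equal_print_peaks_and_valleys_with_water : Prop :=
  ∀ (data : List Int), Dom_print_peaks_and_valleys_with_water data →
    Pre_print_peaks_and_valleys_with_water data →
    Spec_print_peaks_and_valleys_with_water data (print_peaks_and_valleys_with_water data)

-- ===== LEMMAS AND PROOFS =====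

-- the (peak2, peak3, water_level) state transition, as B computes it
def updW (data peaks : List Int) (st : Int × Int × Int) (x : Int) : Int × Int × Int :=
  if peaks.contains x then
    let p2 : Int := ((PySem.List.index? peaks x).getD 0 : Nat)
    let p3 : Int := dg peaks (p2 + 1)
    (p2, p3, min (dg data x) (dg data p3))
  else st

-- the table grown from an arbitrary starting state
def infoFrom (data peaks : List Int) (st : Int × Int × Int) : List Int → List (Int × Int × Int × Int)
  | [] => []
  | x :: cs => (x, updW data peaks st x) :: infoFrom data peaks (updW data peaks st x) cs

-- B's row renderer over a table
def emitRow (data : List Int) (row : Int) (s : String) (info : List (Int × Int × Int × Int)) : String :=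
  info.foldl (fun s e =>
    if dg data e.1 ≥ row then s ++ "  X"
    else if (e.2.1 < e.1 ∧ e.1 ≤ e.2.2.1) ∧ dg data e.1 < e.2.2.2 ∧ e.2.2.2 ≥ row then s ++ "  O"
    else s ++ "   ") s

theorem water_info_from (data peaks : List Int) :
    ∀ (cols : List Int) (acc : List (Int × Int × Int × Int)) (st : Int × Int × Int),
      (cols.foldl
        (fun (acc : List (Int × Int × Int × Int) × Int × Int × Int) x =>
          if peaks.contains x then
            let p2 : Int := ((PySem.List.index? peaks x).getD 0 : Nat)
            let p3 : Int := dg peaks (p2 + 1)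
            let wl : Int := min (dg data x) (dg data p3)
            (acc.1 ++ [(x, p2, p3, wl)], p2, p3, wl)
          else (acc.1 ++ [(x, acc.2.1, acc.2.2.1, acc.2.2.2)], acc.2.1, acc.2.2.1, acc.2.2.2))
        (acc, st)).1 = acc ++ infoFrom data peaks st cols := by
  intro cols
  induction cols with
  | nil => intro acc st; simp [infoFrom]
  | cons x cs ih =>
      intro acc st
      by_cases h : peaks.contains x = true
      · have hm : x ∈ peaks := by simpa using h
        simp only [List.foldl_cons, if_pos h]
        rw [ih]
        simp [infoFrom, updW, hm]
      · have hm : x ∉ peaks := by simpa using h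
        simp only [List.foldl_cons, if_neg h]
        rw [ih]
        simp [infoFrom, updW, hm]

theorem water_info_eq (data peaks : List Int) :
    water_info data peaks
      = infoFrom data peaks (0, 0, 0) (PySem.List.pyRange 0 ((data.length : Int) - 1) 1) := by
  unfold water_info
  rw [water_info_from data peaks _ [] (0, 0, 0)]
  simp

theorem updW_zero (data t : List Int) (st : Int × Int × Int) :
    updW data (0 :: t) st 0 = updW data (0 :: t) (0, 0, 0) 0 := by
  simp [updW]

theorem infoFrom_indep (data t : List Int) (st : Int × Int × Int) (cs : List Int) :
    infoFrom data (0 :: t) st (0 :: cs) = infoFrom data (0 :: t) (0, 0, 0) (0 :: cs) := by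
  rw [infoFrom, infoFrom, updW_zero]

theorem ite_lt_eq_min (a b : Int) : (if a < b then a else b) = min a b := by
  split <;> omega

theorem aInner_eq (data peaks : List Int) (row : Int) (x : Int)
    (hx : x < (data.length : Int) - 1)
    (s : String) (wl p1 p2 p3 : Int) :
    aInner data peaks (data.length : Int) row (s, wl, p1, p2, p3) x
      = ((if dg data x ≥ row then s ++ "  X"
          else if ((updW data peaks (p2, p3, wl) x).1 < x ∧ x ≤ (updW data peaks (p2, p3, wl) x).2.1)
                  ∧ dg data x < (updW data peaks (p2, p3, wl) x).2.2
                  ∧ (updW data peaks (p2, p3, wl) x).2.2 ≥ row then s ++ "  O"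
          else s ++ "   "),
         (updW data peaks (p2, p3, wl) x).2.2, dg data x,
         (updW data peaks (p2, p3, wl) x).1, (updW data peaks (p2, p3, wl) x).2.1) := by
  have hXs : (s ++ "  ") ++ "X" = s ++ "  X" := by rw [String.append_assoc]; rfl
  have hOs : (s ++ "  ") ++ "O" = s ++ "  O" := by rw [String.append_assoc]; rfl
  have hSs : (s ++ "  ") ++ " " = s ++ "   " := by rw [String.append_assoc]; rfl
  by_cases h : peaks.contains x = true
  · simp only [aInner, updW, if_pos h, if_pos hx, ite_lt_eq_min, Prod.mk.injEq]
    refine ⟨?_, trivial⟩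
    split_ifs with c1 c2 c3 c4 c5 <;> first | exact hXs | exact hOs | exact hSs | tauto
  · simp only [aInner, updW, if_neg h, Prod.mk.injEq]
    refine ⟨?_, trivial⟩
    split_ifs with c1 c2 c3 c4 c5 <;> first | exact hXs | exact hOs | exact hSs | tauto

theorem rowA (data peaks : List Int) (row : Int) :
    ∀ (cols : List Int), (∀ x ∈ cols, x < (data.length : Int) - 1) →
      ∀ (s : String) (wl p1 p2 p3 : Int),
        cols.foldl (aInner data peaks (data.length : Int) row) (s, wl, p1, p2, p3)
          = (emitRow data row s (infoFrom data peaks (p2, p3, wl) cols),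
             (cols.foldl (updW data peaks) (p2, p3, wl)).2.2,
             cols.foldl (fun _ x => dg data x) p1,
             (cols.foldl (updW data peaks) (p2, p3, wl)).1,
             (cols.foldl (updW data peaks) (p2, p3, wl)).2.1) := by
  intro cols
  induction cols with
  | nil => intro _ s wl p1 p2 p3; simp [emitRow, infoFrom]
  | cons x cs ih =>
      intro h s wl p1 p2 p3
      have hx : x < (data.length : Int) - 1 := h x (List.mem_cons_self ..)
      rw [List.foldl_cons, aInner_eq data peaks row x hx s wl p1 p2 p3]
      rw [ih (fun y hy => h y (List.mem_cons_of_mem _ hy))]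
      rcases hst : updW data peaks (p2, p3, wl) x with ⟨a, b, c⟩
      simp [infoFrom, emitRow, hst]

theorem outerA (data t : List Int) (hn : (2 : Int) ≤ (data.length : Int)) :
    ∀ (rows : List Int) (s : String) (wl p1 p2 p3 : Int),
      (rows.foldl (aOuter data (0 :: t) (data.length : Int)) (s, wl, p1, p2, p3)).1
        = rows.foldl
            (fun s row =>
              emitRow data row s
                (infoFrom data (0 :: t) (0, 0, 0)
                  (PySem.List.pyRange 0 ((data.length : Int) - 1) 1)) ++ "\n") s := by
  have hcols : PySem.List.pyRange 0 ((data.length : Int) - 1) 1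
      = 0 :: PySem.List.pyRange 1 ((data.length : Int) - 1) 1 :=
    PySem.List.pyRange_one_cons (by omega)
  have hinfo : ∀ st : Int × Int × Int,
      infoFrom data (0 :: t) st (PySem.List.pyRange 0 ((data.length : Int) - 1) 1)
        = infoFrom data (0 :: t) (0, 0, 0) (PySem.List.pyRange 0 ((data.length : Int) - 1) 1) := by
    intro st; rw [hcols]; exact infoFrom_indep data t st _
  have hmem : ∀ x ∈ PySem.List.pyRange 0 ((data.length : Int) - 1) 1,
      x < (data.length : Int) - 1 := by
    intro x hxm
    exact ((PySem.List.mem_pyRange_one).1 hxm).2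
  intro rows
  induction rows with
  | nil => intro s wl p1 p2 p3; rfl
  | cons r rs ih =>
      intro s wl p1 p2 p3
      rw [List.foldl_cons, List.foldl_cons]
      have hr := rowA data (0 :: t) r _ hmem s wl p1 p2 p3
      simp only [aOuter]
      rw [hr, hinfo]
      exact ih _ _ _ _ _

theorem foldl_append_left_str (g : Int → String) :
    ∀ (l : List Int) (a b : String),
      l.foldl (fun s i => s ++ g i) (a ++ b) = a ++ l.foldl (fun s i => s ++ g i) b := by
  intro l
  induction l with
  | nil => intro a b; rfl
  | cons x xs ih => intro a b; simp only [List.foldl_cons, String.append_assoc, ih]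

theorem labels_eq (l : List Int) (a : String) :
    l.foldl (fun s i => if i < 10 then s ++ "  " ++ PySem.Int.toStr i
                        else s ++ " " ++ PySem.Int.toStr i) a
      = a ++ l.foldl (fun s i => s ++ (if i < 10 then "  " else " ") ++ PySem.Int.toStr i) "" := by
  have hcongr : l.foldl (fun s i => if i < 10 then s ++ "  " ++ PySem.Int.toStr i
                        else s ++ " " ++ PySem.Int.toStr i) a
      = l.foldl (fun s i => s ++ ((if i < 10 then "  " else " ") ++ PySem.Int.toStr i)) a := by
    apply PySem.List.foldl_congr_mem
    intro acc x _
    split <;> simp [String.append_assoc]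
  have hcongr2 : l.foldl (fun s i => s ++ (if i < 10 then "  " else " ") ++ PySem.Int.toStr i) ""
      = l.foldl (fun s i => s ++ ((if i < 10 then "  " else " ") ++ PySem.Int.toStr i)) "" := by
    apply PySem.List.foldl_congr_mem
    intro acc x _
    simp [String.append_assoc]
  rw [hcongr, hcongr2]
  have := foldl_append_left_str (fun i => (if i < 10 then "  " else " ") ++ PySem.Int.toStr i) l a ""
  simpa using this

-- ===== VERDICT (by name: the statement is the Claim_ definition above) =====
theorem print_peaks_and_valleys_with_water_spec : Claim_equal_print_peaks_and_valleys_with_water := by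
  intro data _ hpre
  unfold Pre_print_peaks_and_valleys_with_water at hpre
  unfold Spec_print_peaks_and_valleys_with_water
  have hn : (2 : Int) ≤ (data.length : Int) := by exact_mod_cast hpre
  simp only [print_peaks_and_valleys_with_water, print_peaks_and_valleys_with_water_alt]
  rw [show [(0 : Int)] ++ find_peaks data ++ [(data.length : Int) - 1]
        = 0 :: (find_peaks data ++ [(data.length : Int) - 1]) from by simp]
  rw [water_info_eq]
  rw [outerA data (find_peaks data ++ [(data.length : Int) - 1]) hn]
  rw [labels_eq]
  rfl
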